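-- pv_equiv track=rewrite | github.com/xosecaas/practica-algortimos | p2_algoritmos.py | secuencia_hibbard
-- ===== SOURCE A (Python) =====
-- def secuencia_hibbard(n):
--     sec = []
--     k = 1
--     while True:
--         incremento = 2**k - 1
--         if incremento > n // 2:
--             break
--         sec.append(incremento)
--         k += 1
--     return sec
-- ===== SOURCE B (Python) =====
-- def secuencia_hibbard(n):
--     # Recursion on the halved bound: the increments <= b are 1 followed by
--     # 2*x+1 for each increment x <= (b-1)//2 (since 2^k-1 = 2*(2^(k-1)-1)+1).
--     def go(b):
--         if b < 1:
--             return []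
--         return [1] + [2 * x + 1 for x in go((b - 1) // 2)]
--     return go(n // 2)
-- ===== Notes on version B (the rewrite author's own statement) =====
-- stated objective: alternative
-- what changed: Replaces A's iterative loop that computes powers of two and tests a break bound by a divide-and-conquer recursion on the bound itself, prepending the smallest increment and doubling-plus-one the recursively obtained sequence for the halved bound (using the recurrence t_k = 2*t_{k-1}+1 instead of computing 2**k-1).
import Mathlib
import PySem

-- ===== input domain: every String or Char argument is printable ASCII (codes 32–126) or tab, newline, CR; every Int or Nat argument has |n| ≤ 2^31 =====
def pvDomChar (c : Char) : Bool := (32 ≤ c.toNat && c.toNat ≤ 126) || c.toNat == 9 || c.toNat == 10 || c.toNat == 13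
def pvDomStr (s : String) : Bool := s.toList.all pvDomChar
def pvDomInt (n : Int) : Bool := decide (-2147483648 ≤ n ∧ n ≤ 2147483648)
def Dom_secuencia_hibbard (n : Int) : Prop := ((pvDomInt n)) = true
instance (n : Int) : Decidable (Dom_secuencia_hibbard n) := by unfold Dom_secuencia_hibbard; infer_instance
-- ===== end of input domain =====

-- B replaces A's iterative power-and-break loop by a recursion on the halved bound using
-- the recurrence t_k = 2*t_{k-1} + 1 (alternative decomposition, same cost).

-- ===== PORT A =====
-- the 'while True: … break' loop of A, state (sec, k); terminates because 2^k - 1 grows past bound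
def secuenciaHibbardLoop (bound : Int) (sec : List Int) (k : Nat) : List Int :=
  let incremento : Int := 2 ^ k - 1
  if incremento > bound then sec
  else secuenciaHibbardLoop bound (sec ++ [incremento]) (k + 1)
termination_by (bound + 1 - (2 ^ k - 1)).toNat
decreasing_by
  have h1 : (0 : Int) < 2 ^ k := pow_pos (by norm_num) k
  simp only [not_lt] at *
  omega

def secuencia_hibbard (n : Int) : List Int :=
  secuenciaHibbardLoop (PySem.Int.floordiv n 2) [] 1

-- ===== PORT B =====
-- Source B's inner 'go': recursion on the bound halved each step
def hibbardGo (b : Int) : List Int :=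
  if b < 1 then []
  else 1 :: (hibbardGo (PySem.Int.floordiv (b - 1) 2)).map (fun x => 2 * x + 1)
termination_by b.toNat
decreasing_by
  rw [PySem.Int.floordiv_eq_ediv_of_pos (by omega)]
  omega

def secuencia_hibbard_alt (n : Int) : List Int :=
  hibbardGo (PySem.Int.floordiv n 2)

-- ===== PRECONDITION & SPEC =====
def Spec_secuencia_hibbard (n : Int) (out : List Int) : Prop := out = secuencia_hibbard_alt n
instance (n : Int) (out : List Int) : Decidable (Spec_secuencia_hibbard n out) := by unfold Spec_secuencia_hibbard; infer_instance

-- ===== CLAIM =====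
def Claim_equal_secuencia_hibbard : Prop := ∀ (n : Int), Dom_secuencia_hibbard n → Spec_secuencia_hibbard n (secuencia_hibbard n)

-- ===== LEMMAS AND PROOFS =====

-- characterisation of A's loop: it appends exactly the m increments 2^(k+j)-1, j < m,
-- when the (m+1)-st would exceed the bound and the first m do not
lemma secuenciaHibbardLoop_spec (bound : Int) :
    ∀ (m k : Nat) (sec : List Int),
      (2 : Int) ^ (k + m) - 1 > bound →
      (∀ j, j < m → (2 : Int) ^ (k + j) - 1 ≤ bound) →
      secuenciaHibbardLoop bound sec k
        = sec ++ (List.range m).map (fun j => (2 : Int) ^ (k + j) - 1) := by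
  intro m
  induction m with
  | zero =>
      intro k sec hgt _
      rw [secuenciaHibbardLoop]
      simp only [Nat.add_zero] at hgt
      simp [hgt]
  | succ m ih =>
      intro k sec hgt hle
      rw [secuenciaHibbardLoop]
      have h0 : (2 : Int) ^ (k + 0) - 1 ≤ bound := hle 0 (Nat.succ_pos m)
      simp only [Nat.add_zero] at h0
      rw [if_neg (by omega)]
      rw [ih (k + 1) (sec ++ [2 ^ k - 1])
            (by simpa [show k + 1 + m = k + (m + 1) from by omega] using hgt)
            (fun j hj => by simpa [show k + 1 + j = k + (j + 1) from by omega]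
                              using hle (j + 1) (by omega))]
      rw [List.range_succ_eq_map]
      simp only [List.map_cons, List.map_map, List.append_assoc, List.singleton_append]
      congr 2
      apply List.map_congr_left
      intro j _
      simp only [Function.comp_apply]
      congr 2
      omega

-- bit-length of a halved natural
lemma size_div_two (t : Nat) (ht : 2 ≤ t) : (t / 2).size = t.size - 1 := by
  have hupper : t < 2 ^ t.size := Nat.lt_size_self t
  have h2 : 1 < t.size := Nat.lt_size.mpr (by simpa using ht)
  have hlower : 2 ^ (t.size - 1) ≤ t := Nat.lt_size.mp (by omega)
  apply Nat.le_antisymm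
  · rw [Nat.size_le]
    have : 2 ^ t.size = 2 * 2 ^ (t.size - 1) := by
      rw [← pow_succ']; congr 1; omega
    omega
  · have : t.size - 2 < (t / 2).size := by
      rw [Nat.lt_size]
      have : 2 ^ (t.size - 1) = 2 * 2 ^ (t.size - 2) := by
        rw [← pow_succ']; congr 1; omega
      omega
    omega

-- characterisation of B's recursion: same range-map as A's loop
lemma hibbardGo_spec : ∀ (b : Int),
    hibbardGo b = (List.range ((b + 1).toNat.size - 1)).map (fun j => (2 : Int) ^ (1 + j) - 1) := by
  intro b
  induction hm : b.toNat using Nat.strong_induction_on generalizing b with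
  | _ m ih =>
  rw [hibbardGo]
  by_cases hlt : b < 1
  · rw [if_pos hlt]
    have : (b + 1).toNat.size ≤ 1 := by
      rw [Nat.size_le]
      have : (b + 1).toNat ≤ 1 := by omega
      omega
    have h0 : (b + 1).toNat.size - 1 = 0 := by omega
    simp [h0]
  · rw [if_neg hlt]
    set c : Int := PySem.Int.floordiv (b - 1) 2 with hc
    have hce : c = (b - 1) / 2 := by
      rw [hc, PySem.Int.floordiv_eq_ediv_of_pos (by omega)]
    have hclt : c.toNat < m := by omega
    rw [ih c.toNat hclt c rfl]
    -- (c+1).toNat = (b+1).toNat / 2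
    have ht : (c + 1).toNat = (b + 1).toNat / 2 := by omega
    have ht2 : 2 ≤ (b + 1).toNat := by omega
    have hsz : (c + 1).toNat.size = (b + 1).toNat.size - 1 := by
      rw [ht]; exact size_div_two _ ht2
    have hs2 : 1 < (b + 1).toNat.size := Nat.lt_size.mpr (by simpa using ht2)
    rw [hsz]
    have hrange : (b + 1).toNat.size - 1 = ((b + 1).toNat.size - 1 - 1) + 1 := by omega
    rw [hrange, List.range_succ_eq_map]
    simp only [List.map_cons, List.map_map, Nat.add_sub_cancel, List.cons.injEq]
    refine ⟨by norm_num, ?_⟩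
    apply List.map_congr_left
    intro j _
    simp only [Function.comp_apply, Nat.succ_eq_add_one]
    have : (2 : Int) ^ (1 + (j + 1)) = 2 * 2 ^ (1 + j) := by
      rw [show 1 + (j + 1) = (1 + j) + 1 from by omega, pow_succ]; ring
    omega

-- ===== VERDICT =====

theorem secuencia_hibbard_spec : Claim_equal_secuencia_hibbard := by
  intro n _
  unfold Spec_secuencia_hibbard secuencia_hibbard secuencia_hibbard_alt
  set bound := PySem.Int.floordiv n 2 with hb
  rw [hibbardGo_spec bound]
  by_cases hlt : bound < 1
  · rw [secuenciaHibbardLoop_spec bound 0 1 [] (by norm_num; omega) (fun j hj => absurd hj (by omega))]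
    have : (bound + 1).toNat.size ≤ 1 := by
      rw [Nat.size_le]
      have : (bound + 1).toNat ≤ 1 := by omega
      omega
    have h0 : (bound + 1).toNat.size - 1 = 0 := by omega
    simp [h0]
  · rw [not_lt] at hlt
    set b1 : Nat := (bound + 1).toNat with hb1
    have hb1pos : 0 < b1 := by omega
    set s : Nat := b1.size with hs
    have hspos : 0 < s := Nat.size_pos.mpr hb1pos
    have hupper : b1 < 2 ^ s := Nat.lt_size_self b1
    have hlower : 2 ^ (s - 1) ≤ b1 := Nat.lt_size.mp (by omega)
    rw [secuenciaHibbardLoop_spec bound (s - 1) 1 []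
        (by have h1 : 1 + (s - 1) = s := by omega
            rw [h1]
            have : ((2 : Int)) ^ s = ((2 ^ s : Nat) : Int) := by push_cast; ring
            omega)
        (fun j hj => by
            have hjs : 1 + j < s := by omega
            have h2 : (2 : Nat) ^ (1 + j) ≤ b1 := Nat.lt_size.mp hjs
            have : ((2 : Int)) ^ (1 + j) = ((2 ^ (1 + j) : Nat) : Int) := by push_cast; ring
            omega)]
    simp
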